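-- pv_equiv track=rewrite | github.com/xiaojiou176-open/apple-notes-forensics | notes_recovery/utils/bytes.py | extract_printable_sequences
-- ===== SOURCE A (Python) =====
-- def is_printable_char(ch: str) -> bool:
--     if not ch:
--         return False
--     if ch == "\x00":
--         return False
--     return ch.isprintable()
--
-- def extract_printable_sequences(text: str, min_len: int, carry: str) -> tuple[list[str], str]:
--     if min_len <= 0:
--         min_len = 1
--     results: list[str] = []
--     current = list(carry) if carry else []
--     for ch in text:
--         if is_printable_char(ch):
--             current.append(ch)
--         else:
--             if len(current) >= min_len:
--                 results.append("".join(current))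
--             current = []
--     return results, "".join(current)
-- ===== SOURCE B (Python) =====
-- def extract_printable_sequences(text: str, min_len: int, carry: str) -> tuple[list[str], str]:
--     min_len = max(min_len, 1)
--     masked = "".join(ch if (ch.isprintable() and ch != "\x00") else "\x00" for ch in text)
--     segments = masked.split("\x00")
--     segments[0] = carry + segments[0]
--     results = [seg for seg in segments[:-1] if len(seg) >= min_len]
--     return results, segments[-1]
-- ===== Notes on version B (the rewrite author's own statement) =====
-- stated objective: simpler
-- what changed: Replaces the stateful char-by-char accumulator loop with a mask-and-split decomposition: non-printable chars are masked to NUL, the masked string is split on NUL, carry is prepended to the first segment, and all but the last segment are filtered by length.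
import Mathlib
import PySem

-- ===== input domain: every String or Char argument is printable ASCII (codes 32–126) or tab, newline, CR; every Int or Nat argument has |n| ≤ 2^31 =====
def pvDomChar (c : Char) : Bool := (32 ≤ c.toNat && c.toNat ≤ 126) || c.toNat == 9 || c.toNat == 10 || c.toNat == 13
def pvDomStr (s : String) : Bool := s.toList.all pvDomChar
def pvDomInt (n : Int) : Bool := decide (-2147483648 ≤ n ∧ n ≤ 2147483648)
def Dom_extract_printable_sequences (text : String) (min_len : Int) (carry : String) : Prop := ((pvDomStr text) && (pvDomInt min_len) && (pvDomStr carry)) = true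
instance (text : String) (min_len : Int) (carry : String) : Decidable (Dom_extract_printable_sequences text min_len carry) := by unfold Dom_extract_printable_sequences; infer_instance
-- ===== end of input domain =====

-- B replaces A's stateful char-by-char accumulator loop by masking non-printable
-- chars to NUL, splitting on NUL, prepending carry to the first segment and
-- filtering all but the last segment by length (objective: simpler decomposition).

-- ch.isprintable() ported by hand: exact for ASCII code points (printable = codes 32..126);
-- the stated domain admits only ASCII, where this matches CPython exactly.
def pyIsprintableAscii (c : Char) : Bool := 32 ≤ c.toNat && c.toNat ≤ 126

-- ===== PORT A =====
def is_printable_char (ch : Char) : Bool :=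
  -- `if not ch` never fires: iterating a str yields 1-char strings
  if ch = '\x00' then false
  else pyIsprintableAscii ch

def extract_printable_sequences (text : String) (min_len : Int) (carry : String) : List String × String :=
  let min_len := if min_len ≤ 0 then 1 else min_len
  let results : List String := []
  let current : List Char := if carry ≠ "" then carry.toList else []
  let st := text.toList.foldl (fun (st : List String × List Char) ch =>
    if is_printable_char ch then (st.1, st.2 ++ [ch])
    else if (st.2.length : Int) ≥ min_len then (st.1 ++ [String.mk st.2], [])
    else (st.1, [])) (results, current)
  (st.1, String.mk st.2)

-- ===== PORT B =====
-- exact hand port of str.split(sep) for a single-char separator (used as masked.split("\x00"))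
def splitNul : List Char → List (List Char)
  | [] => [[]]
  | c :: rest =>
    match splitNul rest with
    | [] => [[]]  -- unreachable: splitNul never returns []
    | seg :: segs => if c = '\x00' then [] :: seg :: segs else (c :: seg) :: segs

def extract_printable_sequences_alt (text : String) (min_len : Int) (carry : String) : List String × String :=
  let m := max min_len 1
  let masked := text.toList.map (fun ch =>
    if pyIsprintableAscii ch && ch ≠ '\x00' then ch else '\x00')
  let segments := splitNul masked
  let segments := match segments with
    | [] => [carry.toList]  -- unreachable
    | seg :: rest => (carry.toList ++ seg) :: rest
  let results := (segments.dropLast.filter (fun seg => (seg.length : Int) ≥ m)).map String.mk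
  (results, String.mk ((segments.getLast?).getD []))

-- ===== PRECONDITION & SPEC =====
def Spec_extract_printable_sequences (text : String) (min_len : Int) (carry : String) (out : List String × String) : Prop := out = extract_printable_sequences_alt text min_len carry
instance (text : String) (min_len : Int) (carry : String) (out : List String × String) : Decidable (Spec_extract_printable_sequences text min_len carry out) := by unfold Spec_extract_printable_sequences; infer_instance

-- ===== CLAIM (what is proved, stated in full; the proofs are below) =====
def Claim_equal_extract_printable_sequences : Prop := ∀ (text : String) (min_len : Int) (carry : String), Dom_extract_printable_sequences text min_len carry → Spec_extract_printable_sequences text min_len carry (extract_printable_sequences text min_len carry)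

-- ===== LEMMAS AND PROOFS =====

theorem splitNul_ne_nil (l : List Char) : splitNul l ≠ [] := by
  cases l with
  | nil => simp [splitNul]
  | cons c rest =>
    simp only [splitNul]
    cases h : splitNul rest with
    | nil => simp
    | cons s ss => by_cases hc : c = '\x00' <;> simp [hc]

-- the mask used by B
def pvMask (ch : Char) : Char := if pyIsprintableAscii ch && ch ≠ '\x00' then ch else '\x00'

theorem pvMask_eq_nul_iff (ch : Char) : pvMask ch = '\x00' ↔ is_printable_char ch = false := by
  by_cases h0 : ch = '\x00' <;> by_cases hp : pyIsprintableAscii ch = true <;>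
    simp_all [pvMask, is_printable_char]

-- core invariant: A's fold from state (res, cur) equals B's split-based result with
-- cur prepended to the first segment and res prepended to the filtered list
theorem pv_core (m : Int) (l : List Char) (res : List String) (cur : List Char) :
    l.foldl (fun (st : List String × List Char) ch =>
      if is_printable_char ch then (st.1, st.2 ++ [ch])
      else if (st.2.length : Int) ≥ m then (st.1 ++ [String.mk st.2], [])
      else (st.1, [])) (res, cur)
    =
    (let segments := match splitNul (l.map pvMask) with
      | [] => [cur]
      | seg :: rest => (cur ++ seg) :: rest
     (res ++ (segments.dropLast.filter (fun seg => (seg.length : Int) ≥ m)).map String.mk,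
      (segments.getLast?).getD [])) := by
  induction l generalizing res cur with
  | nil => simp [splitNul]
  | cons c rest ih =>
    simp only [List.map_cons, List.foldl_cons, splitNul]
    have hne := splitNul_ne_nil (rest.map pvMask)
    rcases hs : splitNul (rest.map pvMask) with _ | ⟨seg, segs⟩
    · exact absurd hs hne
    · by_cases hp : is_printable_char c = true
      · have h1 : c ≠ '\x00' := by
          intro h; simp [is_printable_char, h] at hp
        have h2 : pyIsprintableAscii c = true := by
          simpa [is_printable_char, h1] using hp
        have hcv : pvMask c = c := by simp [pvMask, h1, h2]
        rw [if_pos hp, ih res (cur ++ [c])]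
        simp [hs, hcv, h1]
      · have hmask : pvMask c = '\x00' := (pvMask_eq_nul_iff c).mpr (by simpa using hp)
        rw [if_neg hp]
        by_cases hlen : (cur.length : Int) ≥ m
        · rw [if_pos hlen, ih (res ++ [String.mk cur]) []]
          have hd : ((cur :: (seg :: segs)).dropLast) = cur :: (seg :: segs).dropLast := rfl
          simp [hmask, hs, hd, hlen]
        · rw [if_neg hlen, ih res []]
          have hd : ((cur :: (seg :: segs)).dropLast) = cur :: (seg :: segs).dropLast := rfl
          simp [hmask, hs, hd, hlen]

-- ===== VERDICT (by name: the statement is the Claim_ definition above) =====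
theorem extract_printable_sequences_spec : Claim_equal_extract_printable_sequences := by
  intro text min_len carry _
  show _ = _
  unfold extract_printable_sequences extract_printable_sequences_alt
  have hm : (if min_len ≤ 0 then 1 else min_len) = max min_len 1 := by omega
  have hcarry : (if carry ≠ "" then carry.toList else []) = carry.toList := by
    by_cases h : carry = "" <;> simp [h]
  simp only [hm, hcarry]
  rw [show (fun ch => if pyIsprintableAscii ch && ch ≠ '\x00' then ch else '\x00') = pvMask from rfl]
  rw [pv_core (max min_len 1) text.toList [] carry.toList]
  simp
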